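-- pv_equiv track=rewrite | github.com/drmauij/Viali | services/openmed-pii/main.py | _find_entity_position
-- ===== SOURCE A (Python) =====
-- from typing import Optional
--
-- def _find_entity_position(text: str, entity_text: str, used_positions: set[int]) -> Optional[tuple[int, int]]:
--     """Find the start/end position of an entity in the text, skipping already-used positions."""
--     search_start = 0
--     while True:
--         idx = text.find(entity_text, search_start)
--         if idx == -1:
--             return None
--         if idx not in used_positions:
--             return (idx, idx + len(entity_text))
--         search_start = idx + 1
-- ===== SOURCE B (Python) =====
-- from typing import Optional
--
-- def _find_entity_position(text: str, entity_text: str, used_positions: set[int]) -> Optional[tuple[int, int]]: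
--     """Scan every candidate start index directly instead of jumping with str.find."""
--     m = len(entity_text)
--     for i in range(len(text) - m + 1):
--         if text[i:i + m] == entity_text and i not in used_positions:
--             return (i, i + m)
--     return None
-- ===== Notes on version B (the rewrite author's own statement) =====
-- stated objective: simpler
-- what changed: Replaced the while-loop around str.find (restarting the search past each used match) by a single pass over all candidate start indices range(len(text)-m+1), returning the first index where the slice equals entity_text and the index is unused.
import Mathlib
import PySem

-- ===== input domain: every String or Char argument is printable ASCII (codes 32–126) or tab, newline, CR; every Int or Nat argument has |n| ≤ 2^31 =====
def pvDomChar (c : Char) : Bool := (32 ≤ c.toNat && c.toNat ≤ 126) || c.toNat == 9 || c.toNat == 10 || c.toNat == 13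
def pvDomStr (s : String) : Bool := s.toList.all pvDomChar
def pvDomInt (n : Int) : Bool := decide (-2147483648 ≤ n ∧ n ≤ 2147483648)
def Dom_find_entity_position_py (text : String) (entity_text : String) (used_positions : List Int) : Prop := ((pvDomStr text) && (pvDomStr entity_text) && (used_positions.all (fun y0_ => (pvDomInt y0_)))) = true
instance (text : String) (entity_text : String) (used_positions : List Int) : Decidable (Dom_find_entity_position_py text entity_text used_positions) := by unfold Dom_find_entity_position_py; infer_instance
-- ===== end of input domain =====

-- B replaces A's while-loop around str.find (restart past each used match) by one scan of
-- all candidate start indices, taking the first whose slice matches and is unused ('simpler').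

-- ===== PORT A =====
-- the two lemmas below are cited by the port's decreasing_by (termination of the while-loop)
lemma pvFindFrom_past (t p : List Char) (s : Nat) (h : t.length < s) :
    PySem.Chars.findFrom t p (s : Int) none = -1 := by
  simp [PySem.Chars.findFrom]; omega

lemma pvFindFrom_bounds (t p : List Char) (s : Nat)
    (h : PySem.Chars.findFrom t p (s : Int) none ≠ -1) :
    (s : Int) ≤ PySem.Chars.findFrom t p (s : Int) none ∧
      PySem.Chars.findFrom t p (s : Int) none ≤ (t.length : Int) := by
  by_cases hs : s ≤ t.length
  · constructor
    · exact (PySem.Chars.findFrom_natCast_spec t p s hs h).1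
    · rw [PySem.Chars.findFrom_natCast t p s hs] at h ⊢
      by_cases hf : PySem.Chars.find (List.drop s t) p = -1
      · simp [hf] at h
      · rw [if_neg hf] at h ⊢
        have := PySem.Chars.find_le_length (List.drop s t) p
        simp only [List.length_drop] at this
        omega
  · exact absurd (pvFindFrom_past t p s (by omega)) h

-- 'while True:' loop of A, state = search_start
def pvFindLoop (t p : List Char) (used : List Int) (s : Nat) : Option (Int × Int) :=
  if h : PySem.Chars.findFrom t p (s : Int) none = -1 then none
  else if used.contains (PySem.Chars.findFrom t p (s : Int) none) then
    pvFindLoop t p used ((PySem.Chars.findFrom t p (s : Int) none).toNat + 1)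
  else some (PySem.Chars.findFrom t p (s : Int) none,
             PySem.Chars.findFrom t p (s : Int) none + (p.length : Int))
termination_by t.length + 1 - s
decreasing_by
  have hb := pvFindFrom_bounds t p s h
  omega

def find_entity_position_py (text : String) (entity_text : String) (used_positions : List Int) : Option (Int × Int) :=
  pvFindLoop text.toList entity_text.toList used_positions 0

-- ===== PORT B =====
def find_entity_position_py_alt (text : String) (entity_text : String) (used_positions : List Int) : Option (Int × Int) :=
  let t := text.toList
  let p := entity_text.toList
  let m : Int := p.length
  ((PySem.List.pyRange 0 ((t.length : Int) - m + 1) 1).find?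
      (fun i => (PySem.List.slice t (some i) (some (i + m)) == p) && !(used_positions.contains i))).map
    (fun i => (i, i + m))

-- ===== PRECONDITION & SPEC =====
def Spec_find_entity_position_py (text : String) (entity_text : String) (used_positions : List Int) (out : Option (Int × Int)) : Prop := out = find_entity_position_py_alt text entity_text used_positions
instance (text : String) (entity_text : String) (used_positions : List Int) (out : Option (Int × Int)) : Decidable (Spec_find_entity_position_py text entity_text used_positions out) := by unfold Spec_find_entity_position_py; infer_instance

-- ===== CLAIM (what is proved, stated in full; the proofs are below) =====
def Claim_equal_find_entity_position_py : Prop := ∀ (text : String) (entity_text : String) (used_positions : List Int), Dom_find_entity_position_py text entity_text used_positions → Spec_find_entity_position_py text entity_text used_positions (find_entity_position_py text entity_text used_positions)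

-- ===== LEMMAS AND PROOFS =====

-- B's slice test at a nonnegative index is exactly "p is a prefix of the text dropped at i"
lemma pvCond_bridge (t p : List Char) (i : Nat) :
    ((PySem.List.slice t (some (i : Int)) (some ((i : Int) + (p.length : Int))) == p) = true)
      ↔ p <+: t.drop i := by
  rw [PySem.List.slice_natCast_add t i p.length]
  rw [beq_iff_eq, List.prefix_iff_eq_take]
  exact eq_comm

-- no occurrence at or after s
lemma pvNoOcc (t p : List Char) (s i : Nat) (hsi : s ≤ i) (h : ¬ p <:+: t.drop s) :
    ¬ p <+: t.drop i := by
  intro hp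
  apply h
  have hdd : t.drop i = (t.drop s).drop (i - s) := by
    rw [List.drop_drop]; congr 1; omega
  rw [hdd] at hp
  exact hp.isInfix.trans (List.drop_suffix (i - s) (t.drop s)).isInfix

-- the loop of A computes B's scan from position s onwards
lemma pvLoop_eq (t p : List Char) (used : List Int) :
    ∀ (k s : Nat), s ≤ t.length + 1 → t.length + 1 - s ≤ k →
    pvFindLoop t p used s =
      ((PySem.List.pyRange (s : Int) ((t.length : Int) - (p.length : Int) + 1) 1).find?
          (fun i => (PySem.List.slice t (some i) (some (i + (p.length : Int))) == p) && !(used.contains i))).map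
        (fun i => (i, i + (p.length : Int))) := by
  intro k
  induction k with
  | zero =>
      intro s hs hk
      have hse : s = t.length + 1 := by omega
      rw [pvFindLoop, dif_pos (pvFindFrom_past t p s (by omega))]
      rw [PySem.List.pyRange_one_eq_nil (by omega)]
      simp
  | succ k ih =>
      intro s hs hk
      rw [pvFindLoop]
      by_cases h : PySem.Chars.findFrom t p (s : Int) none = -1
      · rw [dif_pos h]
        by_cases hsl : s ≤ t.length
        · have hno : ¬ p <:+: t.drop s :=
            (PySem.Chars.findFrom_natCast_eq_neg_one_iff t p s hsl).mp h
          symm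
          rw [Option.map_eq_none_iff, List.find?_eq_none]
          intro x hx
          have hxr := PySem.List.mem_pyRange_one.mp hx
          have hx0 : 0 ≤ x := by omega
          obtain ⟨xn, rfl⟩ : ∃ xn : Nat, x = (xn : Int) := ⟨x.toNat, by omega⟩
          simp only [Bool.and_eq_true, not_and, Bool.not_eq_true]
          intro hsl'
          exact absurd (pvCond_bridge t p xn |>.mp hsl')
            (pvNoOcc t p s xn (by exact_mod_cast hxr.1) hno)
        · rw [PySem.List.pyRange_one_eq_nil (by omega)]
          simp
      · rw [dif_neg h]
        have hsl : s ≤ t.length := by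
          by_contra hc
          exact h (pvFindFrom_past t p s (by omega))
        set idx := PySem.Chars.findFrom t p (s : Int) none with hidx
        obtain ⟨hge, hpre, hmin⟩ := PySem.Chars.findFrom_natCast_spec t p s hsl h
        have hb := pvFindFrom_bounds t p s h
        rw [← hidx] at hge hpre hmin hb
        clear_value idx
        have hidxnn : 0 ≤ idx := by omega
        have hlenle : idx.toNat + p.length ≤ t.length := by
          have := hpre.length_le
          simp only [List.length_drop] at this
          omega
        have hidxlt : idx < (t.length : Int) - (p.length : Int) + 1 := by omega
        -- split the candidate range at idx
        rw [PySem.List.pyRange_one_append (s : Int) idx ((t.length : Int) - (p.length : Int) + 1)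
              hge (by omega)]
        rw [List.find?_append]
        have hfirst : (PySem.List.pyRange (s : Int) idx 1).find?
            (fun i => (PySem.List.slice t (some i) (some (i + (p.length : Int))) == p) && !(used.contains i)) = none := by
          rw [List.find?_eq_none]
          intro x hx
          have hxr := PySem.List.mem_pyRange_one.mp hx
          obtain ⟨xn, rfl⟩ : ∃ xn : Nat, x = (xn : Int) := ⟨x.toNat, by omega⟩
          simp only [Bool.and_eq_true, not_and, Bool.not_eq_true]
          intro hsl'
          exact absurd (pvCond_bridge t p xn |>.mp hsl')
            (hmin xn (by exact_mod_cast hxr.1) (by omega))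
        rw [hfirst, Option.none_or]
        rw [PySem.List.pyRange_one_cons hidxlt]
        have hcondtrue : (PySem.List.slice t (some idx) (some (idx + (p.length : Int))) == p) = true := by
          have : idx = ((idx.toNat : Nat) : Int) := by omega
          rw [this]
          exact (pvCond_bridge t p idx.toNat).mpr hpre
        by_cases hu : used.contains idx
        · -- used: A restarts at idx+1, B's scan skips idx
          rw [if_pos hu]
          rw [List.find?_cons_of_neg (by simp at hu; simp [hcondtrue, hu])]
          have hmeas : s ≤ idx.toNat ∧ idx.toNat ≤ t.length := ⟨by omega, by omega⟩
          have hrec := ih (idx.toNat + 1) (by omega) (by omega)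
          have hcast : ((idx.toNat + 1 : Nat) : Int) = idx + 1 := by omega
          rw [hcast] at hrec
          exact hrec
        · rw [if_neg hu]
          rw [List.find?_cons_of_pos (by simp at hu; simp [hcondtrue, hu])]
          simp

-- ===== VERDICT (by name: the statement is the Claim_ definition above) =====
theorem find_entity_position_py_spec : Claim_equal_find_entity_position_py := by
  intro text entity_text used_positions _
  unfold Spec_find_entity_position_py find_entity_position_py find_entity_position_py_alt
  have := pvLoop_eq text.toList entity_text.toList used_positions
    (text.toList.length + 1) 0 (by omega) (by omega)
  simpa using this
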